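-- pv_equiv track=rewrite | github.com/fadeysss/BacTutor | scripts/upgrade_math_m1_content.py | optionize
-- ===== SOURCE A (Python) =====
-- def optionize(correct: str, wrongs: list[str], seed: int) -> tuple[list[str], int]:
--     correct = str(correct)
--     uniq = []
--     seen = {correct}
--     for wrong in wrongs:
--         wrong = str(wrong)
--         if wrong not in seen:
--             uniq.append(wrong)
--             seen.add(wrong)
--         if len(uniq) == 3:
--             break
--     while len(uniq) < 3:
--         filler = f"variantă {seed}-{len(uniq)}"
--         if filler not in seen:
--             uniq.append(filler)
--             seen.add(filler)
--     pos = seed % 4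
--     if pos == 0:
--         options = [correct] + uniq
--         index = 0
--     elif pos == 1:
--         options = [uniq[0], correct, uniq[1], uniq[2]]
--         index = 1
--     elif pos == 2:
--         options = [uniq[0], uniq[1], correct, uniq[2]]
--         index = 2
--     else:
--         options = [uniq[0], uniq[1], uniq[2], correct]
--         index = 3
--     return options, index
-- ===== SOURCE B (Python) =====
-- def optionize(correct: str, wrongs: list[str], seed: int) -> tuple[list[str], int]:
--     correct = str(correct)
--     pos = seed % 4
--     # emit the 4 option slots front-to-back in one loop: the correct answer at
--     # slot pos, distractors (first-occurrence non-correct wrongs, then fillers)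
--     # in the remaining slots
--     options = []
--     taken = []
--     i = 0
--     emitted = 0
--     while emitted < 4:
--         if emitted == pos:
--             options.append(correct)
--             emitted += 1
--         elif i < len(wrongs):
--             head = str(wrongs[i])
--             i += 1
--             if head != correct and head not in taken:
--                 options.append(head)
--                 taken.append(head)
--                 emitted += 1
--         else:
--             filler = f"variantă {seed}-{len(taken)}"
--             options.append(filler)
--             taken.append(filler)
--             emitted += 1
--     return options, pos
-- ===== Notes on version B (the rewrite author's own statement) =====
-- stated objective: alternative
-- what changed: B builds the 4-option output directly, slot by slot, in one loop that emits the correct answer when the slot counter hits seed%4 and otherwise emits the next fresh wrong (or a filler once wrongs run out); A instead runs two staged loops with a seen-set to build a 3-element uniq list and then places correct with a four-way if/elif.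
import Mathlib
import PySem

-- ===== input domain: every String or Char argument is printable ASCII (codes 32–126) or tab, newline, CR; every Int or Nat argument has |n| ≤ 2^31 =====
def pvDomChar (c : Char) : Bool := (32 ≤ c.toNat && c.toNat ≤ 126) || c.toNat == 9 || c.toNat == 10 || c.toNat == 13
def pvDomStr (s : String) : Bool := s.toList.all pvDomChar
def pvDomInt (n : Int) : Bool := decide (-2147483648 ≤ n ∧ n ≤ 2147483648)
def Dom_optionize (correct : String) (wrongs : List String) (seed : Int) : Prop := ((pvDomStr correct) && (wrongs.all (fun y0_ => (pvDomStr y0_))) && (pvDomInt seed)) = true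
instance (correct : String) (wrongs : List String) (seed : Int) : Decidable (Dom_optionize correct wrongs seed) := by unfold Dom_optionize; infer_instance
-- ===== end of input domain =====

-- B replaces A's two staged loops (seen-set dedup with break, collision-checked filler
-- while-loop) and four-way placement branch with ONE slot-by-slot recursion that emits
-- the final 4-option list directly (objective: alternative).

-- ===== PORT A =====
-- f"variantă {seed}-{n}" as A builds it (n = len(uniq), a Nat in the port)
def pvFillerA (seed : Int) (n : Nat) : String :=
  "variantă " ++ PySem.Int.toStr seed ++ "-" ++ PySem.Int.toStr (Int.ofNat n)

-- the 'for wrong in wrongs' loop with its break (str(wrong) is the identity on strings)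
def pvLoopA : List String → List String → PySem.Set String → List String × PySem.Set String
  | [], uniq, seen => (uniq, seen)
  | w :: rest, uniq, seen =>
    let s := if PySem.Set.contains seen w then (uniq, seen)
             else (uniq ++ [w], PySem.Set.add seen w)
    if s.1.length = 3 then s else pvLoopA rest s.1 s.2

-- the 'while len(uniq) < 3' loop; fuel 3 suffices for every productive run: when the
-- filler is already in seen Python loops forever (those inputs are outside Pre_), the
-- port stops there
def pvFillA (seed : Int) : Nat → List String → PySem.Set String → List String
  | 0, uniq, _ => uniq
  | fuel + 1, uniq, seen =>
    if uniq.length < 3 then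
      let filler := pvFillerA seed uniq.length
      if PySem.Set.contains seen filler then uniq
      else pvFillA seed fuel (uniq ++ [filler]) (PySem.Set.add seen filler)
    else uniq

def optionize (correct : String) (wrongs : List String) (seed : Int) : List String × Int :=
  let p := pvLoopA wrongs [] (PySem.Set.ofList [correct])
  let uniq := pvFillA seed 3 p.1 p.2
  let pos := PySem.Int.mod seed 4
  -- uniq[i]: in Python uniq always has length 3 here (or the while-loop diverged),
  -- so indexing never raises; ported with pyGetD, exact under Pre_
  if pos = 0 then (correct :: uniq, 0)
  else if pos = 1 then
    ([PySem.List.pyGetD uniq 0 "", correct, PySem.List.pyGetD uniq 1 "", PySem.List.pyGetD uniq 2 ""], 1)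
  else if pos = 2 then
    ([PySem.List.pyGetD uniq 0 "", PySem.List.pyGetD uniq 1 "", correct, PySem.List.pyGetD uniq 2 ""], 2)
  else
    ([PySem.List.pyGetD uniq 0 "", PySem.List.pyGetD uniq 1 "", PySem.List.pyGetD uniq 2 "", correct], 3)

-- ===== PORT B =====
-- f"variantă {seed}-{k}" as B builds it (k = len(taken), a Nat cast to Int)
def pvFillerB (seed : Int) (k : Int) : String :=
  "variantă " ++ PySem.Int.toStr seed ++ "-" ++ PySem.Int.toStr k

-- B's 'build': emits the 4 option slots front-to-back in one recursion.
-- Python tests 'emitted == 4'; the port tests '4 ≤ emitted' — identical on every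
-- reachable state (emitted is only ever incremented from 0) and makes the same
-- computation visibly terminating.
def pvBuild (correct : String) (seed pos : Int) (cands taken : List String) (emitted : Nat) : List String :=
  if 4 ≤ emitted then []
  else if (emitted : Int) = pos then
    correct :: pvBuild correct seed pos cands taken (emitted + 1)
  else
    match cands with
    | [] =>
      let filler := pvFillerB seed (taken.length : Int)
      filler :: pvBuild correct seed pos [] (taken ++ [filler]) (emitted + 1)
    | head :: rest =>
      if head == correct || taken.contains head then
        pvBuild correct seed pos rest taken emitted
      else
        head :: pvBuild correct seed pos rest (taken ++ [head]) (emitted + 1)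
  termination_by cands.length + (4 - emitted)
  decreasing_by all_goals simp_wf <;> omega

def optionize_alt (correct : String) (wrongs : List String) (seed : Int) : List String × Int :=
  let pos := PySem.Int.mod seed 4
  (pvBuild correct seed pos wrongs [] 0, pos)

-- ===== PRECONDITION & SPEC =====
-- Pre_ excludes inputs where one of the three filler strings "variantă {seed}-{k}"
-- collides with correct or occurs in wrongs: on such inputs A's while-loop can spin
-- forever (filler already in seen).  The condition is slightly conservative: it also
-- excludes harmless collisions with a wrong that never enters the first three uniques
-- (there A returns and B returns the same value — see the cite in claim.json).
def Pre_optionize (correct : String) (wrongs : List String) (seed : Int) : Prop :=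
  ∀ k ∈ [(0 : Int), 1, 2],
    ("variantă " ++ PySem.Int.toStr seed ++ "-" ++ PySem.Int.toStr k) ≠ correct ∧
    ("variantă " ++ PySem.Int.toStr seed ++ "-" ++ PySem.Int.toStr k) ∉ wrongs

instance (correct : String) (wrongs : List String) (seed : Int) : Decidable (Pre_optionize correct wrongs seed) := by
  unfold Pre_optionize; infer_instance

def pvWitness_optionize : String × List String × Int := ("a", ["b"], 0)

def Spec_optionize (correct : String) (wrongs : List String) (seed : Int) (out : List String × Int) : Prop := out = optionize_alt correct wrongs seed
instance (correct : String) (wrongs : List String) (seed : Int) (out : List String × Int) : Decidable (Spec_optionize correct wrongs seed out) := by unfold Spec_optionize; infer_instance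

-- ===== CLAIM (what is proved, stated in full; the proofs are below) =====
def Claim_equal_optionize : Prop := ∀ (correct : String) (wrongs : List String) (seed : Int), Dom_optionize correct wrongs seed → Pre_optionize correct wrongs seed → Spec_optionize correct wrongs seed (optionize correct wrongs seed)

-- ===== LEMMAS AND PROOFS =====

-- first-occurrence dedup in head-recursive form (proof-side characterisation)
def pvD : List String → List String
  | [] => []
  | w :: rest => w :: (pvD rest).filter (fun x => x != w)

-- proof-side insert-at-index (the shape both programs' outputs share)
def pvIns : Nat → String → List String → List String
  | 0, a, l => a :: l
  | _ + 1, a, [] => [a]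
  | n + 1, a, x :: l => x :: pvIns n a l

-- what remains to be emitted by B from state (cands, taken)
def pvURem (correct : String) (seed : Int) (cands taken : List String) : List String :=
  let t := ((pvD cands).filter (fun w => w != correct && !taken.contains w)).take (3 - taken.length)
  t ++ (PySem.List.pyRange ((taken.length + t.length : Nat) : Int) 3 1).map (pvFillerB seed)

theorem pvD_subset : ∀ (l : List String), ∀ x ∈ pvD l, x ∈ l := by
  intro l
  induction l with
  | nil => simp [pvD]
  | cons w rest ih =>
    intro x hx
    simp only [pvD, List.mem_cons, List.mem_filter] at hx ⊢
    rcases hx with h | h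
    · exact Or.inl h
    · exact Or.inr (ih x h.1)

-- A's wrongs-loop computes take (3 - |uniq|) of the filtered dedup, and keeps
-- seen = {correct} ∪ uniq
theorem pvLoopA_spec (correct : String) : ∀ (rest uniq : List String) (seen : PySem.Set String),
    (∀ x, PySem.Set.contains seen x = (x == correct || uniq.contains x)) →
    uniq.length < 3 →
    (pvLoopA rest uniq seen).1
        = uniq ++ ((pvD rest).filter (fun w => w != correct && !uniq.contains w)).take (3 - uniq.length)
      ∧ ∀ x, PySem.Set.contains (pvLoopA rest uniq seen).2 x
        = (x == correct || (pvLoopA rest uniq seen).1.contains x) := by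
  intro rest
  induction rest with
  | nil =>
    intro uniq seen hseen hlen
    refine ⟨by simp [pvLoopA, pvD], fun x => ?_⟩
    have hx := hseen x
    simpa [pvLoopA] using hx
  | cons w rest ih =>
    intro uniq seen hseen hlen
    by_cases hc : PySem.Set.contains seen w = true
    · -- w already in seen: A skips it; its later copies are filtered out too
      have hw : (w == correct || uniq.contains w) = true := by rw [← hseen]; exact hc
      have hloop : pvLoopA (w :: rest) uniq seen = pvLoopA rest uniq seen := by
        simp only [pvLoopA, hc, if_true]
        rw [if_neg (by omega)]
      rw [hloop]
      obtain ⟨h1, h2⟩ := ih uniq seen hseen hlen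
      refine ⟨?_, h2⟩
      rw [h1]
      have hfw : (fun x => x != correct && !uniq.contains x) w = false := by
        rcases Bool.or_eq_true_iff.mp hw with h | h <;> simp_all
      simp only [pvD, List.filter_cons, hfw, Bool.false_eq_true, if_false,
        List.filter_filter]
      congr 2
      apply List.filter_congr
      intro x _
      by_cases hx : x = w
      · subst hx
        rcases Bool.or_eq_true_iff.mp hw with h | h
        · simp [show x = correct from by simpa using h]
        · simp [show x ∈ uniq from by simpa using h]
      · simp [hx]
    · -- w is new: A appends it; it is the head of the filtered dedup
      have hcf : PySem.Set.contains seen w = false := by simpa using hc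
      have hw : (w == correct || uniq.contains w) = false := by rw [← hseen]; exact hcf
      have hwc : (w == correct) = false := by
        cases h : (w == correct) <;> simp_all
      have hwu : uniq.contains w = false := by
        cases h : uniq.contains w <;> simp_all
      have hwm : w ∉ seen := by simpa using hcf
      have hadd : PySem.Set.add seen w = seen ++ [w] := by
        simp [PySem.Set.add, PySem.Set.contains, hwm]
      have hseen' : ∀ x, PySem.Set.contains (seen ++ [w]) x
          = (x == correct || (uniq ++ [w]).contains x) := by
        intro x
        have hx := hseen x
        simp only [PySem.Set.contains] at hx ⊢
        simp at hx ⊢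
        rw [hx, Bool.or_assoc]
      have hfw : (fun x => x != correct && !uniq.contains x) w = true := by
        simp [show w ≠ correct from by simpa using hwc, show w ∉ uniq from by simpa using hwu]
      have hstep : ((pvD (w :: rest)).filter
            (fun x => x != correct && !uniq.contains x)).take (3 - uniq.length)
          = w :: ((pvD rest).filter
            (fun x => x != correct && !(uniq ++ [w]).contains x)).take (2 - uniq.length) := by
        simp only [pvD, List.filter_cons, hfw, if_true, List.filter_filter]
        have h3 : 3 - uniq.length = (2 - uniq.length) + 1 := by omega
        rw [h3, List.take_succ_cons]
        congr 2
        apply List.filter_congr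
        intro x _
        by_cases hx : x = w
        · subst hx; simp
        · simp [hx, Bool.and_comm]
      by_cases h3 : uniq.length = 2
      · -- the append reaches length 3: break
        have hloop : pvLoopA (w :: rest) uniq seen = (uniq ++ [w], seen ++ [w]) := by
          simp only [pvLoopA, hcf, Bool.false_eq_true, if_false, hadd]
          rw [if_pos (by simp [h3])]
        rw [hloop]
        constructor
        · rw [hstep]
          simp [h3]
        · intro x
          simpa using hseen' x
      · -- still short: recurse on the grown state
        have hlen' : (uniq ++ [w]).length < 3 := by simp; omega
        have hloop : pvLoopA (w :: rest) uniq seen = pvLoopA rest (uniq ++ [w]) (seen ++ [w]) := by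
          simp only [pvLoopA, hcf, Bool.false_eq_true, if_false, hadd]
          rw [if_neg (by simp; omega)]
        rw [hloop]
        obtain ⟨h1, h2⟩ := ih (uniq ++ [w]) (seen ++ [w]) hseen' hlen'
        refine ⟨?_, h2⟩
        rw [h1, hstep]
        simp [show (3:Nat) - (uniq.length + 1) = 2 - uniq.length from by omega]

theorem fillers_ne (seed : Int) (j k : Int) (hj : j ∈ [(0:Int),1,2]) (hk : k ∈ [(0:Int),1,2])
    (hjk : j ≠ k) : pvFillerB seed j ≠ pvFillerB seed k := by
  simp only [List.mem_cons, List.not_mem_nil, or_false] at hj hk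
  have key : ∀ a b : Int, a ∈ [(0:Int),1,2] → b ∈ [(0:Int),1,2] → a ≠ b →
      pvFillerB seed a ≠ pvFillerB seed b := by
    intro a b ha hb hab h
    have h2 := congrArg String.toList h
    simp only [pvFillerB, String.toList_append, PySem.Int.toList_toStr,
      List.append_cancel_left_eq] at h2
    fin_cases ha <;> fin_cases hb <;> simp_all <;> revert h2 <;> decide
  exact key j k (by simp [hj]) (by simp [hk]) hjk

-- fuel-indexed invariant for A's fill phase
theorem fill_aux (correct : String) (seed : Int) : ∀ (n fuel : Nat) (u : List String)
    (seen : PySem.Set String), n ≤ fuel → u.length + n = 3 →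
    (∀ x, PySem.Set.contains seen x = (x == correct || u.contains x)) →
    (∀ k : Int, (u.length : Int) ≤ k → k < 3 →
      (pvFillerB seed k == correct) = false ∧ u.contains (pvFillerB seed k) = false) →
    pvFillA seed fuel u seen = u ++ (PySem.List.pyRange (u.length : Int) 3 1).map (pvFillerB seed) := by
  intro n
  induction n with
  | zero =>
    intro fuel u seen _ hlen hseen hk
    have h3 : u.length = 3 := by omega
    rw [h3]
    have hr : PySem.List.pyRange ((3 : Nat) : Int) 3 1 = [] := by decide
    rw [hr]
    cases fuel <;> simp [pvFillA, h3]
  | succ n ih =>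
    intro fuel u seen hfuel hlen hseen hk
    obtain ⟨f, rfl⟩ : ∃ f, fuel = f + 1 := ⟨fuel - 1, by omega⟩
    have hlt : u.length < 3 := by omega
    have hAB : pvFillerA seed u.length = pvFillerB seed (u.length : Int) := rfl
    have hmemlist : ((u.length : Nat) : Int) ∈ [(0 : Int), 1, 2] := by
      have : u.length = 0 ∨ u.length = 1 ∨ u.length = 2 := by omega
      rcases this with h | h | h <;> simp [h]
    obtain ⟨hbc, hbu⟩ := hk (u.length : Int) (le_refl _) (by exact_mod_cast hlt)
    have hcs : PySem.Set.contains seen (pvFillerB seed (u.length : Int)) = false := by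
      rw [hseen]
      simp [hbc, show pvFillerB seed (u.length : Int) ∉ u from by simpa using hbu]
    have hstep : pvFillA seed (f + 1) u seen
        = pvFillA seed f (u ++ [pvFillerB seed (u.length : Int)])
            (PySem.Set.add seen (pvFillerB seed (u.length : Int))) := by
      simp only [pvFillA, hlt, if_true, hAB, hcs, Bool.false_eq_true, if_false]
    rw [hstep]
    have hns : pvFillerB seed (u.length : Int) ∉ seen := by simpa using hcs
    have hseen' : ∀ x, PySem.Set.contains (PySem.Set.add seen (pvFillerB seed (u.length : Int))) x
        = (x == correct || (u ++ [pvFillerB seed (u.length : Int)]).contains x) := by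
      intro x
      have hx := hseen x
      simp only [PySem.Set.add, PySem.Set.contains] at hx ⊢
      simp [hns] at hx ⊢
      rw [hx, Bool.or_assoc]
    have hk' : ∀ k : Int, ((u ++ [pvFillerB seed (u.length : Int)]).length : Int) ≤ k → k < 3 →
        (pvFillerB seed k == correct) = false ∧
        (u ++ [pvFillerB seed (u.length : Int)]).contains (pvFillerB seed k) = false := by
      intro k hk1 hk2
      simp only [List.length_append, List.length_cons, List.length_nil] at hk1
      have hkl : (u.length : Int) ≤ k := by push_cast at hk1 ⊢; omega
      obtain ⟨hc1, hc2⟩ := hk k hkl hk2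
      refine ⟨hc1, ?_⟩
      have hkm : k ∈ [(0 : Int), 1, 2] := by
        have h0 : (0 : Int) ≤ k := le_trans (by positivity) hkl
        have : k = 0 ∨ k = 1 ∨ k = 2 := by omega
        rcases this with h | h | h <;> simp [h]
      have hne : pvFillerB seed k ≠ pvFillerB seed (u.length : Int) :=
        fillers_ne seed k (u.length : Int) hkm hmemlist (by push_cast at hk1 ⊢; omega)
      simp [show pvFillerB seed k ∉ u from by simpa using hc2, hne]
    have hfin := ih f (u ++ [pvFillerB seed (u.length : Int)])
      (PySem.Set.add seen (pvFillerB seed (u.length : Int)))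
      (by omega) (by simp; omega) hseen' hk'
    rw [hfin]
    have hcons : PySem.List.pyRange (u.length : Int) 3 1
        = (u.length : Int) :: PySem.List.pyRange ((u.length : Int) + 1) 3 1 :=
      PySem.List.pyRange_one_cons (by exact_mod_cast hlt)
    rw [hcons]
    simp [List.map_cons]

-- A's fill phase appends exactly the fillers of range(|u|, 3)
theorem pvFillA_spec (correct : String) (wrongs : List String) (seed : Int)
    (hpre : Pre_optionize correct wrongs seed)
    (u : List String) (seen : PySem.Set String)
    (hu : ∀ x ∈ u, x ∈ wrongs) (hlen : u.length ≤ 3)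
    (hseen : ∀ x, PySem.Set.contains seen x = (x == correct || u.contains x)) :
    pvFillA seed 3 u seen = u ++ (PySem.List.pyRange (u.length : Int) 3 1).map (pvFillerB seed) := by
  apply fill_aux correct seed (3 - u.length) 3 u seen (by omega) (by omega) hseen
  intro k hk1 hk2
  have h0 : (0 : Int) ≤ k := le_trans (by positivity) hk1
  have hkm : k ∈ [(0 : Int), 1, 2] := by
    have : k = 0 ∨ k = 1 ∨ k = 2 := by omega
    rcases this with h | h | h <;> simp [h]
  obtain ⟨h1, h2⟩ := hpre _ hkm
  have hfb : pvFillerB seed k = "variantă " ++ PySem.Int.toStr seed ++ "-" ++ PySem.Int.toStr k := rfl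
  constructor
  · rw [hfb]; simp [h1]
  · have hnu : pvFillerB seed k ∉ u := fun hm => h2 (by rw [← hfb]; exact hu _ hm)
    simpa using hnu

-- step equations for pvBuild (it is defined by well-founded recursion)
theorem pvBuild_stop (correct : String) (seed pos : Int) (cands taken : List String)
    (emitted : Nat) (h1 : 4 ≤ emitted) :
    pvBuild correct seed pos cands taken emitted = [] := by
  rw [pvBuild.eq_def, if_pos h1]

theorem pvBuild_correct_step (correct : String) (seed pos : Int) (cands taken : List String)
    (emitted : Nat) (h1 : ¬ 4 ≤ emitted) (h2 : (emitted : Int) = pos) :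
    pvBuild correct seed pos cands taken emitted
      = correct :: pvBuild correct seed pos cands taken (emitted + 1) := by
  rw [pvBuild.eq_def, if_neg h1, if_pos h2]

theorem pvBuild_nil_step (correct : String) (seed pos : Int) (taken : List String)
    (emitted : Nat) (h1 : ¬ 4 ≤ emitted) (h2 : ¬ (emitted : Int) = pos) :
    pvBuild correct seed pos [] taken emitted
      = pvFillerB seed (taken.length : Int)
          :: pvBuild correct seed pos [] (taken ++ [pvFillerB seed (taken.length : Int)]) (emitted + 1) := by
  rw [pvBuild.eq_def, if_neg h1, if_neg h2]

theorem pvBuild_dup_step (correct : String) (seed pos : Int) (head : String)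
    (rest taken : List String) (emitted : Nat) (h1 : ¬ 4 ≤ emitted)
    (h2 : ¬ (emitted : Int) = pos) (h3 : (head == correct || taken.contains head) = true) :
    pvBuild correct seed pos (head :: rest) taken emitted
      = pvBuild correct seed pos rest taken emitted := by
  rw [pvBuild.eq_def, if_neg h1, if_neg h2]
  simp only [h3, if_true]

theorem pvBuild_fresh_step (correct : String) (seed pos : Int) (head : String)
    (rest taken : List String) (emitted : Nat) (h1 : ¬ 4 ≤ emitted)
    (h2 : ¬ (emitted : Int) = pos) (h3 : (head == correct || taken.contains head) = false) :
    pvBuild correct seed pos (head :: rest) taken emitted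
      = head :: pvBuild correct seed pos rest (taken ++ [head]) (emitted + 1) := by
  rw [pvBuild.eq_def, if_neg h1, if_neg h2]
  simp only [h3, Bool.false_eq_true, if_false]

-- pvURem step equations
theorem pvURem_full (correct : String) (seed : Int) (cands taken : List String)
    (ht : taken.length = 3) : pvURem correct seed cands taken = [] := by
  simp [pvURem, ht]

theorem pvURem_nil_step (correct : String) (seed : Int) (taken : List String)
    (ht : taken.length ≤ 2) :
    pvURem correct seed [] taken
      = pvFillerB seed (taken.length : Int)
          :: pvURem correct seed [] (taken ++ [pvFillerB seed (taken.length : Int)]) := by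
  simp only [pvURem, pvD, List.filter_nil, List.take_nil, List.nil_append,
    List.length_nil, List.length_append, List.length_cons, Nat.add_zero]
  have hcons : PySem.List.pyRange ((taken.length : Nat) : Int) 3 1
      = ((taken.length : Nat) : Int) :: PySem.List.pyRange (((taken.length : Nat) : Int) + 1) 3 1 :=
    PySem.List.pyRange_one_cons (by omega)
  rw [hcons]
  simp only [List.map_cons]
  congr 2

theorem pvURem_dup_step (correct : String) (seed : Int) (head : String)
    (rest taken : List String) (h3 : (head == correct || taken.contains head) = true) :
    pvURem correct seed (head :: rest) taken = pvURem correct seed rest taken := by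
  have hfw : (fun x => x != correct && !taken.contains x) head = false := by
    rcases Bool.or_eq_true_iff.mp h3 with h | h <;> simp_all
  simp only [pvURem, pvD, List.filter_cons, hfw, Bool.false_eq_true, if_false,
    List.filter_filter]
  have hfeq : ((pvD rest).filter (fun a => a != correct && !taken.contains a && a != head))
      = (pvD rest).filter (fun a => a != correct && !taken.contains a) := by
    apply List.filter_congr
    intro x _
    by_cases hx : x = head
    · subst hx
      rcases Bool.or_eq_true_iff.mp h3 with h | h
      · simp [show x = correct from by simpa using h]
      · simp [show x ∈ taken from by simpa using h]
    · simp [hx]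
  rw [hfeq]

theorem pvURem_fresh_step (correct : String) (seed : Int) (head : String)
    (rest taken : List String) (ht : taken.length ≤ 2)
    (h3 : (head == correct || taken.contains head) = false) :
    pvURem correct seed (head :: rest) taken
      = head :: pvURem correct seed rest (taken ++ [head]) := by
  have hwc : (head == correct) = false := by
    cases h : (head == correct) <;> simp_all
  have hwu : taken.contains head = false := by
    cases h : taken.contains head <;> simp_all
  have hfw : (fun x => x != correct && !taken.contains x) head = true := by
    simp [show head ≠ correct from by simpa using hwc,
          show head ∉ taken from by simpa using hwu]
  simp only [pvURem, pvD, List.filter_cons, hfw, if_true, List.filter_filter]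
  have h3' : 3 - taken.length = (3 - (taken ++ [head]).length) + 1 := by
    simp only [List.length_append, List.length_cons, List.length_nil]; omega
  rw [h3', List.take_succ_cons]
  have hfeq : ((pvD rest).filter (fun a => a != correct && !taken.contains a && a != head))
      = (pvD rest).filter (fun a => a != correct && !(taken ++ [head]).contains a) := by
    apply List.filter_congr
    intro x _
    by_cases hx : x = head
    · subst hx; simp
    · simp [hx]
  rw [hfeq]
  simp only [List.cons_append, List.length_cons]
  have hlen2 : ∀ X : Nat, taken.length + (X + 1) = (taken ++ [head]).length + X := by
    intro X
    simp only [List.length_append, List.length_cons, List.length_nil]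
    omega
  rw [hlen2]

-- B's recursion, characterised: from a consistent state it emits pvURem with the
-- correct answer inserted at the (pos - emitted)-th remaining slot
theorem pvBuild_spec (correct : String) (seed pos : Int) (h0 : 0 ≤ pos) (h4 : pos < 4) :
    ∀ (n : Nat) (cands taken : List String) (emitted : Nat), cands.length + (4 - emitted) ≤ n → emitted ≤ 4 →
    (emitted : Int) = (taken.length : Int) + (if pos < (emitted : Int) then 1 else 0) →
    pvBuild correct seed pos cands taken emitted =
      if (emitted : Int) ≤ pos then
        pvIns (pos - (emitted : Int)).toNat correct (pvURem correct seed cands taken)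
      else pvURem correct seed cands taken := by
  intro n
  induction n with
  | zero =>
    intro cands taken emitted hn he hinv
    have he4 : emitted = 4 := by omega
    subst he4
    have ht : taken.length = 3 := by
      rw [if_pos (by omega)] at hinv; omega
    rw [pvBuild_stop correct seed pos cands taken 4 (by omega), if_neg (by omega),
      pvURem_full correct seed cands taken ht]
  | succ n ih =>
    intro cands taken emitted hn he hinv
    by_cases hstop : 4 ≤ emitted
    · have he4 : emitted = 4 := by omega
      subst he4
      have ht : taken.length = 3 := by
        rw [if_pos (by omega)] at hinv; omega
      rw [pvBuild_stop correct seed pos cands taken 4 (by omega), if_neg (by omega),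
        pvURem_full correct seed cands taken ht]
    · have hlt4 : emitted < 4 := by omega
      by_cases hpos : (emitted : Int) = pos
      · -- emit the correct answer
        have hb : (if pos < (emitted : Int) then (1:Int) else 0) = 0 := by
          rw [if_neg (by omega)]
        rw [hb] at hinv
        have hinv' : ((emitted + 1 : Nat) : Int)
            = (taken.length : Int) + (if pos < ((emitted + 1 : Nat) : Int) then 1 else 0) := by
          push_cast; rw [if_pos (by omega)]; omega
        have hrec := ih cands taken (emitted + 1) (by omega) (by omega) hinv'
        rw [pvBuild_correct_step correct seed pos cands taken emitted hstop hpos, hrec]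
        rw [if_neg (by push_cast; omega)]
        rw [if_pos (by omega)]
        have hz : ((pos - (emitted : Int)).toNat) = 0 := by omega
        rw [hz]
        rfl
      · -- emit a distractor slot
        have htlen : taken.length ≤ 2 := by
          by_cases hb : pos < (emitted : Int)
          · rw [if_pos hb] at hinv; omega
          · rw [if_neg hb] at hinv
            by_contra hcon
            have : taken.length = 3 := by omega
            omega
        have hinv' : ((emitted + 1 : Nat) : Int)
            = ((taken.length + 1 : Nat) : Int) + (if pos < ((emitted + 1 : Nat) : Int) then 1 else 0) := by
          by_cases hb : pos < (emitted : Int)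
          · rw [if_pos (by push_cast; omega)]
            rw [if_pos hb] at hinv; push_cast; omega
          · rw [if_neg (by push_cast; omega)]
            rw [if_neg hb] at hinv; push_cast; omega
        -- shared step for the two emitting branches: head-cons on pvURem and pvIns
        have hins : ∀ (x : String) (l : List String),
            x :: (if ((emitted + 1 : Nat) : Int) ≤ pos then
                pvIns (pos - ((emitted + 1 : Nat) : Int)).toNat correct l else l)
            = (if (emitted : Int) ≤ pos then
                pvIns (pos - (emitted : Int)).toNat correct (x :: l) else x :: l) := by
          intro x l
          by_cases hle : (emitted : Int) ≤ pos
          · have hlt : (emitted : Int) < pos := lt_of_le_of_ne hle hpos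
            rw [if_pos hle, if_pos (by push_cast; omega)]
            have hsplit : (pos - (emitted : Int)).toNat
                = (pos - ((emitted + 1 : Nat) : Int)).toNat + 1 := by
              push_cast; omega
            rw [hsplit]
            rfl
          · rw [if_neg hle, if_neg (by push_cast; omega)]
        cases cands with
        | nil =>
          have hrec := ih [] (taken ++ [pvFillerB seed (taken.length : Int)]) (emitted + 1)
            (by simp; omega) (by omega) (by simpa using hinv')
          rw [pvBuild_nil_step correct seed pos taken emitted hstop hpos, hrec,
            pvURem_nil_step correct seed taken htlen]
          exact hins _ _
        | cons head rest =>
          by_cases hdup : (head == correct || taken.contains head) = true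
          · have hrec := ih rest taken emitted (by simp at hn ⊢; omega) (by omega) hinv
            rw [pvBuild_dup_step correct seed pos head rest taken emitted hstop hpos hdup, hrec,
              pvURem_dup_step correct seed head rest taken hdup]
          · have hdupf : (head == correct || taken.contains head) = false := by
              simpa using hdup
            have hrec := ih rest (taken ++ [head]) (emitted + 1)
              (by simp at hn ⊢; omega) (by omega) (by simpa using hinv')
            rw [pvBuild_fresh_step correct seed pos head rest taken emitted hstop hpos hdupf,
              hrec, pvURem_fresh_step correct seed head rest taken htlen hdupf]
            exact hins _ _

-- A's four-way branch on a length-3 uniq is insert-at-pos, for 0 ≤ pos < 4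
theorem branch_eq_ins (correct : String) (l : List String) (pos : Int)
    (hl : l.length = 3) (h0 : 0 ≤ pos) (h4 : pos < 4) :
    (if pos = 0 then (correct :: l, (0:Int))
     else if pos = 1 then ([PySem.List.pyGetD l 0 "", correct, PySem.List.pyGetD l 1 "", PySem.List.pyGetD l 2 ""], 1)
     else if pos = 2 then ([PySem.List.pyGetD l 0 "", PySem.List.pyGetD l 1 "", correct, PySem.List.pyGetD l 2 ""], 2)
     else ([PySem.List.pyGetD l 0 "", PySem.List.pyGetD l 1 "", PySem.List.pyGetD l 2 "", correct], 3))
    = (pvIns pos.toNat correct l, pos) := by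
  obtain ⟨a, b, c, rfl⟩ : ∃ a b c, l = [a, b, c] := by
    rcases l with _ | ⟨a, _ | ⟨b, _ | ⟨c, _ | d⟩⟩⟩ <;> simp_all
  interval_cases pos <;>
    simp [pvIns, PySem.List.pyGetD, PySem.List.pyGet?, PySem.List.pyIdx?]

-- ===== VERDICT (by name: the statement is the Claim_ definition above) =====
theorem optionize_spec : Claim_equal_optionize := by
  intro correct wrongs seed _ hpre
  unfold Spec_optionize optionize optionize_alt
  have h0 : (0 : Int) ≤ PySem.Int.mod seed 4 := PySem.Int.mod_nonneg seed (by norm_num)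
  have h4 : PySem.Int.mod seed 4 < 4 := PySem.Int.mod_lt seed (by norm_num)
  set pos := PySem.Int.mod seed 4 with hposdef
  -- A side
  have hseen0 : ∀ x, PySem.Set.contains (PySem.Set.ofList [correct]) x
      = (x == correct || ([] : List String).contains x) := by
    intro x
    simp [PySem.Set.ofList, PySem.Set.add, PySem.Set.contains, PySem.Set.empty,
      Bool.beq_eq_decide_eq]
  obtain ⟨hA1, hA2⟩ := pvLoopA_spec correct wrongs [] (PySem.Set.ofList [correct]) hseen0 (by simp)
  set p := pvLoopA wrongs [] (PySem.Set.ofList [correct]) with hp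
  have hA1' : p.1 = ((pvD wrongs).filter (fun w => w != correct)).take 3 := by
    rw [hA1]; simp
  have hlen3 : p.1.length ≤ 3 := by rw [hA1']; simp
  have hsub : ∀ x ∈ p.1, x ∈ wrongs := by
    intro x hx
    rw [hA1'] at hx
    exact pvD_subset wrongs x (List.mem_of_mem_filter (List.mem_of_mem_take hx))
  have hfill := pvFillA_spec correct wrongs seed hpre p.1 p.2 hsub hlen3 hA2
  set u := p.1 ++ (PySem.List.pyRange (p.1.length : Int) 3 1).map (pvFillerB seed) with hu
  have hLlen : u.length = 3 := by
    simp [hu, PySem.List.length_pyRange_one]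
    omega
  -- B side: build wrongs [] 0 = insert correct at pos into pvURem wrongs []
  have hB := pvBuild_spec correct seed pos h0 h4 (wrongs.length + 4) wrongs [] 0
    (by omega) (by omega) (by rw [if_neg (by omega)]; simp)
  rw [if_pos (by exact_mod_cast h0)] at hB
  have hBu : pvURem correct seed wrongs [] = u := by
    have hfeq : ((pvD wrongs).filter (fun w => w != correct && !(([] : List String).contains w)))
        = (pvD wrongs).filter (fun w => w != correct) := by
      apply List.filter_congr
      intro x _
      simp
    simp only [pvURem, hfeq, List.length_nil, Nat.zero_add]
    rw [hu, hA1']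
  rw [hBu] at hB
  have hcast : ((0 : Nat) : Int) = (0 : Int) := rfl
  rw [hcast, sub_zero] at hB
  -- combine
  simp only [hfill]
  rw [hB]
  exact branch_eq_ins correct u pos hLlen h0 h4
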